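-- pv_equiv track=rewrite | github.com/pypi-data/pypi-mirror-301 | packages/waterbridge/waterbridge-0.2.0-py3-none-any.whl/waterbridge/3_Nomenclature of waterbridges.py | sort_amino_acids
-- ===== SOURCE A (Python) =====
-- def sort_amino_acids(coded_amino_acids_list):
--     # part 1: categorize amino acids based on their suffixes
--     main_chain_list = []
--     main_chain_side_list = []
--     side_chain_list = []
--
--     for acid in coded_amino_acids_list:
--         if '(m)' in acid: main_chain_list.append(acid)
--         elif '(ms)' in acid: main_chain_side_list.append(acid)
--         elif '(s)' in acid: side_chain_list.append(acid)
--
--     # sort each category in reverse order as amino acids will be written on left side of :w: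
--     main_chain_list.sort(reverse=True)
--     main_chain_side_list.sort(reverse=True)
--     side_chain_list.sort(reverse=True)
--
--     # exclude empty lists
--     final_parts = []
--     if side_chain_list: final_parts.append('|'.join(side_chain_list))
--     if main_chain_side_list: final_parts.append('|'.join(main_chain_side_list))
--     if main_chain_list: final_parts.append('|'.join(main_chain_list))
--
--     final_string = '|'.join(final_parts)
--     return final_string
-- ===== SOURCE B (Python) =====
-- def sort_amino_acids(coded_amino_acids_list):
--     # rank mirrors the if/elif priority; output order is (s) < (ms) < (m)
--     def rank(acid):
--         if '(m)' in acid: return 2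
--         if '(ms)' in acid: return 1
--         if '(s)' in acid: return 0
--         return None
--     matched = [a for a in coded_amino_acids_list if rank(a) is not None]
--     matched.sort(reverse=True)
--     matched.sort(key=rank)  # stable: reverse-alphabetical order kept within each rank
--     return '|'.join(matched)
-- ===== Notes on version B (the rewrite author's own statement) =====
-- stated objective: simpler
-- what changed: Replaced A's three partition lists, three separate reverse sorts and conditional sub-joins by a rank helper mirroring the elif priority, one filter, one reverse sort plus one stable sort keyed on rank, and a single '|'.join.
import Mathlib
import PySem

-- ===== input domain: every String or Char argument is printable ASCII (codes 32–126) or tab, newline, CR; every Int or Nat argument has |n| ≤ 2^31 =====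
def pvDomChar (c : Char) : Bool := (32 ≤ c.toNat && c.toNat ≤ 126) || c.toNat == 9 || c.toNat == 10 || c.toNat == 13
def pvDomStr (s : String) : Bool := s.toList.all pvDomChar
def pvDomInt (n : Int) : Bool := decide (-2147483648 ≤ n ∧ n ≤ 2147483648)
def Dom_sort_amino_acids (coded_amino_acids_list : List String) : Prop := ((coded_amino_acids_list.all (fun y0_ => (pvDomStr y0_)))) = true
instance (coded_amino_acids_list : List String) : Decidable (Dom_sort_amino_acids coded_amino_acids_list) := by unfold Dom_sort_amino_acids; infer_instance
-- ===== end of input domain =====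

-- B replaces A's three partition lists, three sorts and conditional sub-joins by one filter,
-- one reverse sort plus one stable keyed sort, and a single join (objective: simpler).

-- ===== PORT A =====
def sort_amino_acids (coded_amino_acids_list : List String) : String :=
  -- part 1: one loop appending each acid to one of three category lists (elif priority kept)
  let groups := coded_amino_acids_list.foldl
    (fun (st : List String × List String × List String) acid =>
      if PySem.Str.isIn "(m)" acid then (st.1 ++ [acid], st.2.1, st.2.2)
      else if PySem.Str.isIn "(ms)" acid then (st.1, st.2.1 ++ [acid], st.2.2)
      else if PySem.Str.isIn "(s)" acid then (st.1, st.2.1, st.2.2 ++ [acid])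
      else st)
    ([], [], [])
  -- .sort(reverse=True) on each category
  let main_chain_list := PySem.List.sorted groups.1 (fun x => x) true
  let main_chain_side_list := PySem.List.sorted groups.2.1 (fun x => x) true
  let side_chain_list := PySem.List.sorted groups.2.2 (fun x => x) true
  -- exclude empty lists, then '|'.join
  let final_parts : List String := []
  let final_parts := if side_chain_list ≠ [] then final_parts ++ [PySem.Str.join "|" side_chain_list] else final_parts
  let final_parts := if main_chain_side_list ≠ [] then final_parts ++ [PySem.Str.join "|" main_chain_side_list] else final_parts
  let final_parts := if main_chain_list ≠ [] then final_parts ++ [PySem.Str.join "|" main_chain_list] else final_parts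
  PySem.Str.join "|" final_parts

-- ===== PORT B =====
-- rank mirrors the if/elif priority; output order is (s)=0 < (ms)=1 < (m)=2
def saaRank? (acid : String) : Option Int :=
  if PySem.Str.isIn "(m)" acid then some 2
  else if PySem.Str.isIn "(ms)" acid then some 1
  else if PySem.Str.isIn "(s)" acid then some 0
  else none

def sort_amino_acids_alt (coded_amino_acids_list : List String) : String :=
  let matched := coded_amino_acids_list.filter (fun a => (saaRank? a).isSome)
  let matched := PySem.List.sorted matched (fun x => x) true
  -- stable sort keyed on rank (every element of matched has a rank; getD 0 only totalizes the key)
  let matched := PySem.List.sorted matched (fun a => (saaRank? a).getD 0) false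
  PySem.Str.join "|" matched

-- ===== PRECONDITION & SPEC =====
def Spec_sort_amino_acids (coded_amino_acids_list : List String) (out : String) : Prop := out = sort_amino_acids_alt coded_amino_acids_list
instance (coded_amino_acids_list : List String) (out : String) : Decidable (Spec_sort_amino_acids coded_amino_acids_list out) := by unfold Spec_sort_amino_acids; infer_instance

-- ===== CLAIM (what is proved, stated in full; the proofs are below) =====
def Claim_equal_sort_amino_acids : Prop := ∀ (coded_amino_acids_list : List String), Dom_sort_amino_acids coded_amino_acids_list → Spec_sort_amino_acids coded_amino_acids_list (sort_amino_acids coded_amino_acids_list)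

-- ===== LEMMAS AND PROOFS =====

-- the three (disjoint) category predicates, in A's elif priority
def fM (a : String) : Bool := PySem.Str.isIn "(m)" a
def fMS (a : String) : Bool := !PySem.Str.isIn "(m)" a && PySem.Str.isIn "(ms)" a
def fS (a : String) : Bool := !PySem.Str.isIn "(m)" a && !PySem.Str.isIn "(ms)" a && PySem.Str.isIn "(s)" a

lemma afold (xs : List String) (t : List String × List String × List String) :
    xs.foldl
      (fun (st : List String × List String × List String) acid =>
        if PySem.Str.isIn "(m)" acid then (st.1 ++ [acid], st.2.1, st.2.2)
        else if PySem.Str.isIn "(ms)" acid then (st.1, st.2.1 ++ [acid], st.2.2)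
        else if PySem.Str.isIn "(s)" acid then (st.1, st.2.1, st.2.2 ++ [acid])
        else st) t
    = (t.1 ++ xs.filter fM, t.2.1 ++ xs.filter fMS, t.2.2 ++ xs.filter fS) := by
  induction xs generalizing t with
  | nil => simp
  | cons x xs ih =>
    rw [List.foldl_cons]
    by_cases hm : PySem.Str.isIn "(m)" x = true <;>
      by_cases hms : PySem.Str.isIn "(ms)" x = true <;>
        by_cases hs : PySem.Str.isIn "(s)" x = true <;>
          simp only [hm, hms, hs, List.filter_cons, fM, fMS, fS, ih] <;>
          simp [List.append_assoc]

lemma insertBy_append_left (before : String → String → Bool) (x : String) (A rest : List String)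
    (h : ∀ a ∈ A, before x a = false) :
    PySem.List.insertBy before x (A ++ rest) = A ++ PySem.List.insertBy before x rest := by
  induction A with
  | nil => simp
  | cons a A ih =>
    rw [List.cons_append, PySem.List.insertBy.eq_2, if_neg]
    · rw [ih (fun b hb => h b (List.mem_cons_of_mem _ hb)), List.cons_append]
    · simp [h a (List.mem_cons_self ..)]

lemma rnk_cases (a : String) (h : (saaRank? a).isSome) :
    (saaRank? a).getD 0 = (0:Int) ∨ (saaRank? a).getD 0 = (1:Int) ∨ (saaRank? a).getD 0 = (2:Int) := by
  unfold saaRank? at *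
  split_ifs at * <;> simp_all

lemma bucket (xs : List String) (A B C : List String)
    (hA : ∀ a ∈ A, (saaRank? a).getD 0 = (0:Int))
    (hB : ∀ a ∈ B, (saaRank? a).getD 0 = (1:Int))
    (hC : ∀ a ∈ C, (saaRank? a).getD 0 = (2:Int))
    (hxs : ∀ x ∈ xs, (saaRank? x).isSome) :
    xs.foldl (fun acc x => PySem.List.insertBy
        (fun a b => decide ((saaRank? a).getD 0 < (saaRank? b).getD 0)) x acc) (A ++ B ++ C)
    = (A ++ xs.filter (fun a => (saaRank? a).getD 0 == (0:Int)))
      ++ (B ++ xs.filter (fun a => (saaRank? a).getD 0 == (1:Int)))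
      ++ (C ++ xs.filter (fun a => (saaRank? a).getD 0 == (2:Int))) := by
  induction xs generalizing A B C with
  | nil => simp
  | cons x xs ih =>
    rw [List.foldl_cons]
    rcases rnk_cases x (hxs x (List.mem_cons_self ..)) with h0 | h1 | h2
    · have step : PySem.List.insertBy
          (fun a b => decide ((saaRank? a).getD 0 < (saaRank? b).getD 0)) x (A ++ B ++ C)
          = (A ++ [x]) ++ B ++ C := by
        rw [List.append_assoc, insertBy_append_left _ _ _ _
          (fun a ha => by simp [h0, hA a ha])]
        cases hbc : B ++ C with
        | nil => simp [hbc, PySem.List.insertBy.eq_1]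
        | cons y ys =>
          have hy : y ∈ B ++ C := by rw [hbc]; exact List.mem_cons_self ..
          have hge : (saaRank? y).getD 0 = (1:Int) ∨ (saaRank? y).getD 0 = (2:Int) := by
            rcases List.mem_append.mp hy with h | h
            · exact Or.inl (hB y h)
            · exact Or.inr (hC y h)
          rw [PySem.List.insertBy.eq_2,
            if_pos (by rcases hge with h | h <;> simp [h0, h]), ← hbc]
          simp
      rw [step, ih (A ++ [x]) B C
        (by intro a ha; rcases List.mem_append.mp ha with h | h
            · exact hA a h
            · simp at h; subst h; exact h0)
        hB hC (fun y hy => hxs y (List.mem_cons_of_mem _ hy))]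
      simp [h0]
    · have step : PySem.List.insertBy
          (fun a b => decide ((saaRank? a).getD 0 < (saaRank? b).getD 0)) x (A ++ B ++ C)
          = A ++ (B ++ [x]) ++ C := by
        rw [insertBy_append_left _ _ _ _
          (fun a ha => by rcases List.mem_append.mp ha with h | h
                          · simp [h1, hA a h]
                          · simp [h1, hB a h])]
        cases hc : C with
        | nil => simp [PySem.List.insertBy.eq_1]
        | cons y ys =>
          have h2y := hC y (by rw [hc]; exact List.mem_cons_self ..)
          rw [PySem.List.insertBy.eq_2, if_pos (by simp [h1, h2y]), ← hc]
          simp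
      rw [step, ih A (B ++ [x]) C hA
        (by intro a ha; rcases List.mem_append.mp ha with h | h
            · exact hB a h
            · simp at h; subst h; exact h1)
        hC (fun y hy => hxs y (List.mem_cons_of_mem _ hy))]
      simp [h1]
    · have step : PySem.List.insertBy
          (fun a b => decide ((saaRank? a).getD 0 < (saaRank? b).getD 0)) x (A ++ B ++ C)
          = A ++ B ++ (C ++ [x]) := by
        rw [PySem.List.insertBy_of_forall_not_before _ _ _
          (fun a ha => by
            rcases List.mem_append.mp ha with h | h
            · rcases List.mem_append.mp h with h' | h'
              · simp [h2, hA a h']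
              · simp [h2, hB a h']
            · simp [h2, hC a h])]
        simp
      rw [step, ih A B (C ++ [x]) hA hB
        (by intro a ha; rcases List.mem_append.mp ha with h | h
            · exact hC a h
            · simp at h; subst h; exact h2)
        (fun y hy => hxs y (List.mem_cons_of_mem _ hy))]
      simp [h2]

-- filtering commutes with the (identity-key) reverse sort
lemma filter_sorted_rev (p : String → Bool) (xs : List String) :
    (PySem.List.sorted xs (fun x => x) true).filter p
      = PySem.List.sorted (xs.filter p) (fun x => x) true := by
  refine List.eq_of_perm_of_sorted (le := fun a b : String => b ≤ a)
    (fun a b _ _ h1 h2 => le_antisymm h2 h1) ?_ ?_ ?_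
  · exact List.Pairwise.sublist List.filter_sublist (PySem.List.sorted_pairwise_rev xs (fun x => x))
  · exact PySem.List.sorted_pairwise_rev (xs.filter p) (fun x => x)
  · exact ((PySem.List.sorted_perm xs (fun x => x) true).filter p).trans
      (PySem.List.sorted_perm (xs.filter p) (fun x => x) true).symm

-- pointwise: "has a rank and the rank is i" is the i-th category predicate
lemma rank0_eq_fS (a : String) :
    ((((saaRank? a).getD 0 == (0:Int))) && (saaRank? a).isSome) = fS a := by
  unfold saaRank? fS
  by_cases hm : PySem.Str.isIn "(m)" a = true <;>
    by_cases hms : PySem.Str.isIn "(ms)" a = true <;>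
      by_cases hs : PySem.Str.isIn "(s)" a = true <;> simp_all

lemma rank1_eq_fMS (a : String) :
    ((((saaRank? a).getD 0 == (1:Int))) && (saaRank? a).isSome) = fMS a := by
  unfold saaRank? fMS
  by_cases hm : PySem.Str.isIn "(m)" a = true <;>
    by_cases hms : PySem.Str.isIn "(ms)" a = true <;>
      by_cases hs : PySem.Str.isIn "(s)" a = true <;> simp_all

lemma rank2_eq_fM (a : String) :
    ((((saaRank? a).getD 0 == (2:Int))) && (saaRank? a).isSome) = fM a := by
  unfold saaRank? fM
  by_cases hm : PySem.Str.isIn "(m)" a = true <;>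
    by_cases hms : PySem.Str.isIn "(ms)" a = true <;>
      by_cases hs : PySem.Str.isIn "(s)" a = true <;> simp_all

lemma charsJoin_append (sep : List Char) (A B : List (List Char)) (hA : A ≠ []) (hB : B ≠ []) :
    PySem.Chars.join sep (A ++ B) = PySem.Chars.join sep A ++ sep ++ PySem.Chars.join sep B := by
  induction A with
  | nil => exact absurd rfl hA
  | cons a A ih =>
    cases A with
    | nil =>
      cases B with
      | nil => exact absurd rfl hB
      | cons b B => simp [PySem.Chars.join_cons_cons, PySem.Chars.join_singleton]
    | cons a2 A =>
      rw [List.cons_append, List.cons_append, PySem.Chars.join_cons_cons,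
        ← List.cons_append, ih (by simp) ]
      rw [PySem.Chars.join_cons_cons]
      simp [List.append_assoc]

lemma strJoin_append (A B : List String) (hA : A ≠ []) (hB : B ≠ []) :
    PySem.Str.join "|" (A ++ B) = PySem.Str.join "|" A ++ "|" ++ PySem.Str.join "|" B := by
  apply String.toList_inj.mp
  rw [String.toList_append, String.toList_append, PySem.Str.toList_join, PySem.Str.toList_join,
    PySem.Str.toList_join, List.map_append]
  exact charsJoin_append _ _ _ (by simpa using hA) (by simpa using hB)

lemma strJoin_singleton (x : String) : PySem.Str.join "|" [x] = x := by
  apply String.toList_inj.mp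
  rw [PySem.Str.toList_join]
  simp [PySem.Chars.join_singleton]

-- '|'.join of the nonempty category joins = '|'.join of the concatenation
lemma join_parts (S MS M : List String) :
    PySem.Str.join "|"
      (if M ≠ [] then
         (if MS ≠ [] then (if S ≠ [] then [PySem.Str.join "|" S] else []) ++ [PySem.Str.join "|" MS]
          else (if S ≠ [] then [PySem.Str.join "|" S] else [])) ++ [PySem.Str.join "|" M]
       else
         (if MS ≠ [] then (if S ≠ [] then [PySem.Str.join "|" S] else []) ++ [PySem.Str.join "|" MS]
          else (if S ≠ [] then [PySem.Str.join "|" S] else [])))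
    = PySem.Str.join "|" (S ++ MS ++ M) := by
  by_cases hS : S = [] <;> by_cases hMS : MS = [] <;> by_cases hM : M = []
  · simp [hS, hMS, hM]
  · simp [hS, hMS, hM, strJoin_singleton]
  · simp [hS, hMS, hM, strJoin_singleton]
  · rw [if_pos hM, if_pos hMS, if_neg (by simpa using hS), hS]
    rw [List.nil_append, List.nil_append,
      strJoin_append [PySem.Str.join "|" MS] [PySem.Str.join "|" M] (by simp) (by simp),
      strJoin_singleton, strJoin_singleton, strJoin_append MS M hMS hM]
  · simp [hS, hMS, hM, strJoin_singleton]
  · rw [if_pos hM, if_neg (by simpa using hMS), if_pos hS, hMS]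
    rw [List.append_nil,
      strJoin_append [PySem.Str.join "|" S] [PySem.Str.join "|" M] (by simp) (by simp),
      strJoin_singleton, strJoin_singleton, strJoin_append S M hS hM]
  · rw [if_neg (by simpa using hM), if_pos hMS, if_pos hS, hM]
    rw [List.append_nil,
      strJoin_append [PySem.Str.join "|" S] [PySem.Str.join "|" MS] (by simp) (by simp),
      strJoin_singleton, strJoin_singleton, strJoin_append S MS hS hMS]
  · rw [if_pos hM, if_pos hMS, if_pos hS]
    rw [strJoin_append ([PySem.Str.join "|" S] ++ [PySem.Str.join "|" MS]) [PySem.Str.join "|" M] (by simp) (by simp),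
      strJoin_append [PySem.Str.join "|" S] [PySem.Str.join "|" MS] (by simp) (by simp),
      strJoin_singleton, strJoin_singleton, strJoin_singleton,
      strJoin_append (S ++ MS) M (by simp [hS]) hM,
      strJoin_append S MS hS hMS]

-- ===== VERDICT (by name: the statement is the Claim_ definition above) =====
theorem sort_amino_acids_spec : Claim_equal_sort_amino_acids := by
  unfold Claim_equal_sort_amino_acids
  intro xs _
  unfold Spec_sort_amino_acids sort_amino_acids sort_amino_acids_alt
  simp only [afold, List.nil_append]
  -- B side: rewrite the stable rank sort as the three concatenated buckets
  set matched := xs.filter (fun a => (saaRank? a).isSome) with hmatched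
  set rev := PySem.List.sorted matched (fun x => x) true with hrev
  have hxs : ∀ y ∈ rev, (saaRank? y).isSome := by
    intro y hy
    have : y ∈ matched := (PySem.List.mem_sorted _ _ _ _).mp hy
    exact (List.mem_filter.mp this).2
  have hB : PySem.List.sorted rev (fun a => (saaRank? a).getD 0) false
      = rev.filter (fun a => (saaRank? a).getD 0 == (0:Int))
        ++ rev.filter (fun a => (saaRank? a).getD 0 == (1:Int))
        ++ rev.filter (fun a => (saaRank? a).getD 0 == (2:Int)) := by
    rw [PySem.List.sorted_eq_foldl_insertBy]
    have := bucket rev [] [] [] (by simp) (by simp) (by simp) hxs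
    simpa using this
  have hfilt : ∀ (i : Int) (g : String → Bool), (∀ a, (((saaRank? a).getD 0 == i) && (saaRank? a).isSome) = g a) →
      rev.filter (fun a => (saaRank? a).getD 0 == i)
        = PySem.List.sorted (xs.filter g) (fun x => x) true := by
    intro i g hg
    rw [hrev, filter_sorted_rev, hmatched, List.filter_filter]
    congr 1
    exact List.filter_congr (fun a _ => hg a)
  rw [hB, hfilt 0 fS rank0_eq_fS, hfilt 1 fMS rank1_eq_fMS, hfilt 2 fM rank2_eq_fM]
  exact join_parts _ _ _
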